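-- pv_equiv track=rewrite | github.com/MedGm/Smart-eCommerce-Intelligence-Pipeline | src/scraping/html_fallback.py | _pick_candidate_by_priority
-- ===== SOURCE A (Python) =====
-- def _pick_candidate_by_priority(
--     candidates: list[dict[str, str]], source_priority: list[str]
-- ) -> dict[str, str] | None:
--     by_source: dict[str, list[dict[str, str]]] = {}
--     for candidate in candidates:
--         by_source.setdefault(candidate["source"], []).append(candidate)
--
--     for source in source_priority:
--         options = by_source.get(source)
--         if options:
--             return options[0]
--     return candidates[0] if candidates else None
-- ===== SOURCE B (Python) =====
-- def _pick_candidate_by_priority(candidates, source_priority):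
--     rank = {}
--     for i, s in enumerate(source_priority):
--         rank.setdefault(s, i)
--     default = len(source_priority)
--     best = None
--     best_rank = default + 1
--     for c in candidates:
--         r = rank.get(c["source"], default)
--         if r < best_rank:
--             best = c
--             best_rank = r
--     return best
-- ===== Notes on version B (the rewrite author's own statement) =====
-- stated objective: alternative
-- what changed: Replaces A's two-phase group-candidates-into-a-dict-of-lists-then-scan-the-priority-list with a first-index rank table over source_priority and a single strict-argmin pass over candidates (strict < keeps the first occurrence, absent sources rank len(source_priority), so the tie-breaking and the empty/no-match fallbacks coincide).
import Mathlib
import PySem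

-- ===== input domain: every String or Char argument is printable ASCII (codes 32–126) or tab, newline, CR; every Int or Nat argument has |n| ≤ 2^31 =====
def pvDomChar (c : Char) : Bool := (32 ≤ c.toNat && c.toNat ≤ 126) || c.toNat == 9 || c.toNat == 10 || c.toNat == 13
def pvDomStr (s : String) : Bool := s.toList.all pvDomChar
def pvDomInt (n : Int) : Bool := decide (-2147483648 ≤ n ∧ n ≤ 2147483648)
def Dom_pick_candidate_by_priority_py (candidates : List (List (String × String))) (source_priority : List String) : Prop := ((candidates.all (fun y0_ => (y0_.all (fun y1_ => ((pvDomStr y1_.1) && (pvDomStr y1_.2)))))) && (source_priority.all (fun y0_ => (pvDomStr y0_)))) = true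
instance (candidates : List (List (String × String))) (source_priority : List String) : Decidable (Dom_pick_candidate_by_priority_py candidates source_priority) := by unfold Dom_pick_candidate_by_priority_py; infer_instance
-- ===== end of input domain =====

-- B replaces A's group-candidates-by-source dict plus priority scan with a first-index rank
-- table and a single strict-argmin pass over the candidates (objective: alternative, same cost).

-- ===== PORT A =====
-- candidate["source"]: first-match lookup in the candidate's assoc list; the .getD "" is
-- exact under Pre_ (every candidate carries a "source" key; Python raises KeyError otherwise).
def pvSrc (c : List (String × String)) : String :=
  ((PySem.Dict.mk c).get? "source").getD ""

-- the 'for source in source_priority' loop; after it falls through: candidates[0] if candidates else None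
def pickA_loop (d : PySem.Dict String (List (List (String × String))))
    (cands : List (List (String × String))) : List String → Option (List (String × String))
  | [] => cands.head?
  | s :: rest =>
    match PySem.Dict.get? d s with
    | some (c :: _) => some c        -- 'if options: return options[0]'
    | _ => pickA_loop d cands rest   -- options is None or []

def pick_candidate_by_priority_py (candidates : List (List (String × String))) (source_priority : List String) : Option (List (String × String)) :=
  -- by_source.setdefault(candidate["source"], []).append(candidate)
  let by_source : PySem.Dict String (List (List (String × String))) :=
    candidates.foldl (fun d c => PySem.Dict.modify d (pvSrc c) [] (fun l => l ++ [c])) PySem.Dict.empty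
  pickA_loop by_source candidates source_priority

-- ===== PORT B =====
def pick_candidate_by_priority_py_alt (candidates : List (List (String × String))) (source_priority : List String) : Option (List (String × String)) :=
  -- rank.setdefault(s, i) for i, s in enumerate(source_priority): first index wins
  let rank : PySem.Dict String Int :=
    (PySem.List.enumerate source_priority 0).foldl (fun d p => PySem.Dict.setdefault d p.2 p.1) PySem.Dict.empty
  let dflt : Int := source_priority.length
  let res :=
    candidates.foldl (fun st c =>
      let r := PySem.Dict.getD rank (pvSrc c) dflt
      if r < st.2 then (some c, r) else st)
      ((none : Option (List (String × String))), dflt + 1)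
  res.1

-- ===== PRECONDITION & SPEC =====
-- Pre_ excludes exactly the candidates lists in which some candidate lacks a "source" key:
-- there Python A (and Python B) raise KeyError.
def Pre_pick_candidate_by_priority_py (candidates : List (List (String × String))) (source_priority : List String) : Prop :=
  ∀ c ∈ candidates, (PySem.Dict.mk c).contains "source" = true

instance (candidates : List (List (String × String))) (source_priority : List String) : Decidable (Pre_pick_candidate_by_priority_py candidates source_priority) := by unfold Pre_pick_candidate_by_priority_py; infer_instance

def pvWitness_pick_candidate_by_priority_py : (List (List (String × String))) × List String :=
  ([[("source", "amazon"), ("title", "x")], [("source", "ebay")]], ["ebay", "amazon"])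

def Spec_pick_candidate_by_priority_py (candidates : List (List (String × String))) (source_priority : List String) (out : Option (List (String × String))) : Prop := out = pick_candidate_by_priority_py_alt candidates source_priority
instance (candidates : List (List (String × String))) (source_priority : List String) (out : Option (List (String × String))) : Decidable (Spec_pick_candidate_by_priority_py candidates source_priority out) := by unfold Spec_pick_candidate_by_priority_py; infer_instance

-- ===== CLAIM (what is proved, stated in full; the proofs are below) =====
def Claim_equal_pick_candidate_by_priority_py : Prop := ∀ (candidates : List (List (String × String))) (source_priority : List String), Dom_pick_candidate_by_priority_py candidates source_priority → Pre_pick_candidate_by_priority_py candidates source_priority → Spec_pick_candidate_by_priority_py candidates source_priority (pick_candidate_by_priority_py candidates source_priority)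

-- ===== LEMMAS AND PROOFS =====

-- first index of s in l (the value rank.setdefault stores); l.length if absent
def rnk : List String → String → Nat
  | [], _ => 0
  | x :: t, s => if x = s then 0 else rnk t s + 1

-- the common reference value both ports are reduced to
def pvSpec (cands : List (List (String × String))) (priority : List String) : Option (List (String × String)) :=
  match priority.find? (fun s => cands.any (fun c => pvSrc c == s)) with
  | some s => cands.find? (fun c => pvSrc c == s)
  | none => cands.head?

-- first element of c :: t with minimal f-value (strict improvement only)
def argminF {α : Type} (f : α → Nat) : α → List α → α
  | b, [] => b
  | b, c :: t => if f c < f b then argminF f c t else argminF f b t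

theorem rnk_le (l : List String) (s : String) : rnk l s ≤ l.length := by
  induction l with
  | nil => simp [rnk]
  | cons x t ih => simp only [rnk, List.length_cons]; split <;> omega

theorem rnk_eq_length_of_not_mem (l : List String) (s : String) (h : s ∉ l) : rnk l s = l.length := by
  induction l with
  | nil => simp [rnk]
  | cons x t ih =>
    simp only [List.mem_cons, not_or] at h
    simp [rnk, Ne.symm h.1, ih h.2]

theorem rnk_getElem (l : List String) (s : String) (h : rnk l s < l.length) : l[rnk l s] = s := by
  induction l with
  | nil => simp at h
  | cons x t ih =>
    by_cases hx : x = s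
    · simp [rnk, hx]
    · simp only [rnk, hx, if_false, List.length_cons] at h ⊢
      simpa using ih (by omega)

theorem rnk_append_of_not_mem (pre rest : List String) (s : String) (h : s ∉ pre) :
    rnk (pre ++ rest) s = pre.length + rnk rest s := by
  induction pre with
  | nil => simp [rnk]
  | cons x t ih =>
    simp only [List.mem_cons, not_or] at h
    simp only [List.cons_append, rnk, Ne.symm h.1, if_false, ih h.2, List.length_cons]
    omega

-- ===== rank-dict characterisation (B's first loop) =====
theorem rank_get? (l : List String) (k : Int) (d : PySem.Dict String Int) (s : String) :
    ((PySem.List.enumerate l k).foldl (fun d p => PySem.Dict.setdefault d p.2 p.1) d).get? s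
      = (d.get? s).or (if s ∈ l then some (k + (rnk l s : Int)) else none) := by
  induction l generalizing k d with
  | nil => simp [PySem.List.enumerate]
  | cons x t ih =>
    simp only [PySem.List.enumerate, List.foldl_cons]
    by_cases hc : d.contains x = true
    · rw [PySem.Dict.setdefault_of_contains _ _ hc, ih]
      by_cases hx : x = s
      · subst hx
        have : (d.get? x).isSome := by rw [← PySem.Dict.contains_eq_isSome_get?, hc]
        obtain ⟨v, hv⟩ := Option.isSome_iff_exists.mp this
        simp [hv, Option.or]
      · cases hds : d.get? s <;> by_cases hm : s ∈ t <;>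
          simp [hds, hx, Ne.symm hx, hm, rnk, Option.or] <;> omega
    · rw [PySem.Dict.setdefault_of_not_contains _ _ (by simpa using hc), ih]
      have hd : d.get? x = none := by
        rw [PySem.Dict.contains_eq_isSome_get?] at hc
        simpa using hc
      by_cases hx : x = s
      · subst hx
        simp [PySem.Dict.get?_insert, hd, rnk, Option.or]
      · rw [PySem.Dict.get?_insert]
        simp only [Ne.symm hx, if_false]
        cases hds : d.get? s <;> by_cases hm : s ∈ t <;>
          simp [hds, hx, Ne.symm hx, hm, rnk, Option.or] <;> omega

theorem rank_getD (priority : List String) (s : String) :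
    PySem.Dict.getD
      ((PySem.List.enumerate priority 0).foldl (fun d p => PySem.Dict.setdefault d p.2 p.1) PySem.Dict.empty)
      s (priority.length : Int) = (rnk priority s : Int) := by
  rw [PySem.Dict.getD_eq_get?_getD, rank_get?]
  by_cases hm : s ∈ priority
  · simp [hm, PySem.Dict.get?_empty, Option.or]
  · simp [hm, PySem.Dict.get?_empty, Option.or, rnk_eq_length_of_not_mem _ _ hm]

-- ===== grouping-dict characterisation (A's first loop) =====
theorem groupA_get? (cands : List (List (String × String)))
    (d : PySem.Dict String (List (List (String × String)))) (s : String) :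
    (cands.foldl (fun d c => PySem.Dict.modify d (pvSrc c) [] (fun l => l ++ [c])) d).get? s
      = if d.contains s = true ∨ (∃ c ∈ cands, pvSrc c = s)
        then some (PySem.Dict.getD d s [] ++ cands.filter (fun c => pvSrc c == s))
        else none := by
  induction cands generalizing d with
  | nil =>
    simp only [List.foldl_nil, List.filter_nil, List.append_nil, List.not_mem_nil]
    by_cases hc : d.contains s = true
    · have : (d.get? s).isSome := by rw [← PySem.Dict.contains_eq_isSome_get?, hc]
      obtain ⟨v, hv⟩ := Option.isSome_iff_exists.mp this
      simp [hc, hv, PySem.Dict.getD_eq_get?_getD]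
    · have hd : d.get? s = none := by
        rw [PySem.Dict.contains_eq_isSome_get?] at hc
        simpa using hc
      simp [hc, hd]
  | cons c t ih =>
    simp only [List.foldl_cons]
    rw [ih]
    simp only [PySem.Dict.modify, List.filter_cons, List.mem_cons]
    by_cases hx : pvSrc c = s
    · subst hx
      have h1 : (d.insert (pvSrc c) (PySem.Dict.getD d (pvSrc c) [] ++ [c])).contains (pvSrc c) = true := by
        rw [PySem.Dict.contains_insert]; simp
      rw [if_pos (Or.inl h1), if_pos (Or.inr ⟨c, by simp, rfl⟩), PySem.Dict.getD_insert]
      simp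
    · have hbeq : (pvSrc c == s) = false := by simpa using hx
      rw [PySem.Dict.contains_insert, PySem.Dict.getD_insert]
      have hbeq2 : (s == pvSrc c) = false := by simpa using Ne.symm hx
      simp only [hbeq, hbeq2, Bool.false_or, Ne.symm hx, if_false]
      by_cases hor : d.contains s = true ∨ ∃ x ∈ t, pvSrc x = s
      · rw [if_pos hor, if_pos (by
          rcases hor with h | ⟨x, hx2, hx3⟩
          · exact Or.inl h
          · exact Or.inr ⟨x, by simp [hx2], hx3⟩)]
        simp
      · rw [if_neg hor, if_neg (by
          rintro (h | ⟨x, hxm, hx3⟩)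
          · exact hor (Or.inl h)
          · rcases List.mem_cons.mp hxm with rfl | hx2
            · exact hx hx3
            · exact hor (Or.inr ⟨x, hx2, hx3⟩))]

-- ===== A's priority loop = pvSpec =====
theorem loopA_spec (cands : List (List (String × String))) (priority : List String)
    (d : PySem.Dict String (List (List (String × String))))
    (h : ∀ s, d.get? s = if (∃ c ∈ cands, pvSrc c = s)
        then some (cands.filter (fun c => pvSrc c == s)) else none) :
    pickA_loop d cands priority = pvSpec cands priority := by
  induction priority with
  | nil => simp [pickA_loop, pvSpec]
  | cons s rest ih =>
    by_cases he : ∃ c ∈ cands, pvSrc c = s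
    · have hany : (cands.any (fun c => pvSrc c == s)) = true := by
        rw [List.any_eq_true]; obtain ⟨c, hc1, hc2⟩ := he; exact ⟨c, hc1, by simpa using hc2⟩
      have hne : cands.filter (fun c => pvSrc c == s) ≠ [] := by
        rw [Ne, List.filter_eq_nil_iff]
        obtain ⟨c, hc1, hc2⟩ := he
        exact fun hall => hall c hc1 (by simpa using hc2)
      obtain ⟨c0, t0, hft⟩ : ∃ c0 t0, cands.filter (fun c => pvSrc c == s) = c0 :: t0 := by
        cases hft : cands.filter (fun c => pvSrc c == s) with
        | nil => exact absurd hft hne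
        | cons a b => exact ⟨a, b, rfl⟩
      have hget : d.get? s = some (c0 :: t0) := by rw [h s, if_pos he, hft]
      have hfind : cands.find? (fun c => pvSrc c == s) = some c0 := by
        rw [← List.head?_filter, hft]; rfl
      have hfs : List.find? (fun s' => cands.any (fun c => pvSrc c == s')) (s :: rest) = some s :=
        List.find?_cons_of_pos hany
      simp [pickA_loop, hget, pvSpec, hfs, hfind]
    · have hany : (cands.any (fun c => pvSrc c == s)) = false := by
        rw [Bool.eq_false_iff, Ne, List.any_eq_true]
        rintro ⟨c, hc, hcs⟩
        exact he ⟨c, hc, by simpa using hcs⟩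
      have hget : d.get? s = none := by rw [h s, if_neg he]
      have hfs : List.find? (fun s' => cands.any (fun c => pvSrc c == s')) (s :: rest)
          = List.find? (fun s' => cands.any (fun c => pvSrc c == s')) rest :=
        List.find?_cons_of_neg (by simp [hany])
      simp only [pickA_loop, hget]
      rw [ih]
      simp only [pvSpec, hfs]

-- ===== argminF facts =====
theorem argmin_mem {α : Type} (f : α → Nat) (c : α) (t : List α) : argminF f c t ∈ c :: t := by
  induction t generalizing c with
  | nil => simp [argminF]
  | cons c' t ih =>
    simp only [argminF]
    split
    · have := ih c'
      simp only [List.mem_cons] at this ⊢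
      tauto
    · have := ih c
      simp only [List.mem_cons] at this ⊢
      tauto

theorem argmin_le {α : Type} (f : α → Nat) (c : α) (t : List α) :
    ∀ y ∈ c :: t, f (argminF f c t) ≤ f y := by
  induction t generalizing c with
  | nil => simp [argminF]
  | cons c' t ih =>
    intro y hy
    simp only [List.mem_cons] at hy
    by_cases hlt : f c' < f c
    · simp only [argminF, if_pos hlt]
      rcases hy with h | h | h
      · subst h
        exact le_of_lt (lt_of_le_of_lt (ih c' c' (by simp)) hlt)
      · exact h ▸ ih c' c' (by simp)
      · exact ih c' y (by simp [h])
    · simp only [argminF, if_neg hlt]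
      rcases hy with h | h | h
      · exact h ▸ ih c c (by simp)
      · exact h ▸ le_trans (ih c c (by simp)) (Nat.le_of_not_lt hlt)
      · exact ih c y (by simp [h])

theorem argmin_of_no_lt {α : Type} (f : α → Nat) (c : α) (t : List α)
    (h : ∀ y ∈ t, ¬ f y < f c) : argminF f c t = c := by
  induction t with
  | nil => rfl
  | cons c' t ih =>
    simp only [argminF, if_neg (h c' (by simp))]
    exact ih (fun y hy => h y (by simp [hy]))

theorem argmin_find {α : Type} (f : α → Nat) (c : α) (t : List α) :
    (c :: t).find? (fun y => f y == f (argminF f c t)) = some (argminF f c t) := by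
  induction t generalizing c with
  | nil => simp [argminF]
  | cons c' t ih =>
    by_cases hlt : f c' < f c
    · simp only [argminF, if_pos hlt]
      have h2 : f (argminF f c' t) ≤ f c' := argmin_le f c' t c' (by simp)
      rw [List.find?_cons_of_neg (by simp only [beq_iff_eq]; omega)]
      exact ih c'
    · simp only [argminF, if_neg hlt]
      by_cases hc : f c = f (argminF f c t)
      · have h1 := ih c
        rw [List.find?_cons_of_pos (by simp [hc])] at h1
        rw [List.find?_cons_of_pos (by simp [hc])]
        exact h1
      · have hle : f (argminF f c t) ≤ f c := argmin_le f c t c (by simp)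
        have hfc' : ¬ f c' = f (argminF f c t) := by omega
        have h1 := ih c
        rw [List.find?_cons_of_neg (by simpa using hc)] at h1
        rw [List.find?_cons_of_neg (by simpa using hc), List.find?_cons_of_neg (by simpa using hfc')]
        exact h1

-- ===== B's candidate fold = argminF =====
theorem foldB_some (f : List (String × String) → Nat) (t : List (List (String × String)))
    (b : List (String × String)) :
    t.foldl (fun st c => if (f c : Int) < st.2 then (some c, (f c : Int)) else st)
        ((some b : Option (List (String × String))), (f b : Int))
      = (some (argminF f b t), (f (argminF f b t) : Int)) := by
  induction t generalizing b with
  | nil => rfl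
  | cons c t ih =>
    by_cases hlt : f c < f b
    · simp only [List.foldl_cons, if_pos (by exact_mod_cast hlt : (f c : Int) < (f b : Int)), argminF,
        if_pos hlt, ih]
    · simp only [List.foldl_cons, if_neg (by exact_mod_cast hlt : ¬ (f c : Int) < (f b : Int)), argminF,
        if_neg hlt, ih]

-- ===== main combinatorial step: the first strict argmin equals pvSpec on a nonempty list =====
theorem argmin_eq_spec (priority : List String) (c : List (String × String))
    (t : List (List (String × String))) :
    some (argminF (fun y => rnk priority (pvSrc y)) c t) = pvSpec (c :: t) priority := by
  cases hfind : priority.find? (fun s => (c :: t).any (fun y => pvSrc y == s)) with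
  | none =>
    have hnone : ∀ y ∈ c :: t, pvSrc y ∉ priority := by
      intro y hy hmem
      have h1 := List.find?_eq_none.mp hfind (pvSrc y) hmem
      exact h1 (List.any_eq_true.mpr ⟨y, hy, by simp⟩)
    have hconst : ∀ y ∈ c :: t, rnk priority (pvSrc y) = priority.length :=
      fun y hy => rnk_eq_length_of_not_mem _ _ (hnone y hy)
    rw [argmin_of_no_lt _ _ _ (fun y hy => by
      rw [hconst y (by simp [hy]), hconst c (by simp)]; omega)]
    simp only [pvSpec, hfind, List.head?_cons]
  | some s =>
    obtain ⟨hps, pre, post, hsplit, hpre⟩ := List.find?_eq_some_iff_append.mp hfind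
    set f : List (String × String) → Nat := fun y => rnk priority (pvSrc y) with hf
    have hs_not_pre : s ∉ pre := by
      intro hmem
      have h1 := hpre s hmem
      rw [hps] at h1
      simp at h1
    have hlenlt : pre.length < priority.length := by
      rw [hsplit]; simp
    have hj : rnk priority s = pre.length := by
      rw [hsplit, rnk_append_of_not_mem _ _ _ hs_not_pre]; simp [rnk]
    have hlow : ∀ y, y ∈ c :: t → pre.length ≤ f y := by
      intro y hy
      by_contra hlt
      have hlt' : f y < pre.length := Nat.lt_of_not_le hlt
      have hypre : pvSrc y ∈ pre := by
        by_contra hnp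
        have h2 := rnk_append_of_not_mem pre (s :: post) (pvSrc y) hnp
        rw [← hsplit] at h2
        have : f y = rnk priority (pvSrc y) := rfl
        omega
      have h3 := hpre (pvSrc y) hypre
      simp only [Bool.not_eq_eq_eq_not, Bool.not_true] at h3
      have h4 : ((c :: t).any (fun c' => pvSrc c' == pvSrc y)) = true :=
        List.any_eq_true.mpr ⟨y, hy, by simp⟩
      rw [h4] at h3
      simp at h3
    obtain ⟨y0, hy0, hy0s⟩ : ∃ y ∈ c :: t, pvSrc y = s := by
      rw [List.any_eq_true] at hps
      obtain ⟨y, hy, hys⟩ := hps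
      exact ⟨y, hy, by simpa using hys⟩
    have hy0r : f y0 = pre.length := by
      show rnk priority (pvSrc y0) = pre.length
      rw [hy0s, hj]
    have hm : f (argminF f c t) = pre.length := by
      have h1 := argmin_le f c t y0 hy0
      have h2 := hlow (argminF f c t) (argmin_mem f c t)
      omega
    have hpred : ∀ y : List (String × String), f y = pre.length → pvSrc y = s := by
      intro y hfy
      have hlt : rnk priority (pvSrc y) < priority.length := by
        have : f y = rnk priority (pvSrc y) := rfl
        omega
      have hg1 := rnk_getElem priority (pvSrc y) hlt
      have hg2 := rnk_getElem priority s (by omega)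
      have he : rnk priority (pvSrc y) = rnk priority s := by
        have : f y = rnk priority (pvSrc y) := rfl
        omega
      rw [← hg1, ← hg2]
      congr 1
    have hpredeq : (fun y : List (String × String) => pvSrc y == s)
        = fun y => f y == f (argminF f c t) := by
      funext y
      rw [hm]
      by_cases hys : pvSrc y = s
      · have : f y = pre.length := by
          show rnk priority (pvSrc y) = pre.length
          rw [hys, hj]
        simp [hys, this]
      · have : ¬ f y = pre.length := fun hh => hys (hpred y hh)
        simp [hys, this]
    simp only [pvSpec, hfind]
    rw [hpredeq]
    exact (argmin_find f c t).symm

-- ===== the two ports equal pvSpec =====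
theorem portA_eq_spec (cands : List (List (String × String))) (priority : List String) :
    pick_candidate_by_priority_py cands priority = pvSpec cands priority := by
  simp only [pick_candidate_by_priority_py]
  apply loopA_spec
  intro s
  rw [groupA_get?]
  simp [PySem.Dict.contains_empty, PySem.Dict.getD_empty]

theorem portB_eq_spec (cands : List (List (String × String))) (priority : List String) :
    pick_candidate_by_priority_py_alt cands priority = pvSpec cands priority := by
  simp only [pick_candidate_by_priority_py_alt]
  rw [PySem.List.foldl_congr_mem cands _
    (fun st (c : List (String × String)) =>
      if ((rnk priority (pvSrc c) : Nat) : Int) < st.2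
      then (some c, ((rnk priority (pvSrc c) : Nat) : Int)) else st)
    _ (fun st c _ => by rw [rank_getD])]
  cases cands with
  | nil =>
    simp only [List.foldl_nil, pvSpec]
    split <;> rfl
  | cons c t =>
    have h1 : ((rnk priority (pvSrc c) : Nat) : Int) < (priority.length : Int) + 1 := by
      have := rnk_le priority (pvSrc c); omega
    rw [List.foldl_cons, if_pos h1, foldB_some (fun y => rnk priority (pvSrc y)) t c]
    exact argmin_eq_spec priority c t

-- ===== VERDICT (by name: the statement is the Claim_ definition above) =====
theorem pick_candidate_by_priority_py_spec : Claim_equal_pick_candidate_by_priority_py := by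
  intro cands priority _ _
  unfold Spec_pick_candidate_by_priority_py
  rw [portA_eq_spec, portB_eq_spec]
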